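-- pv_equiv track=rewrite | github.com/hyren01/qingdao-jdqd-dev | python/JDQD/algorithm/event_forecast/obtain_data.py | remove_dupli_dates_events
-- ===== SOURCE A (Python) =====
-- def remove_dupli_dates_events(events, event_priority):
--     """
--     去除一天内多次发生的重复事件
--     :param event_priority:
--     :param events: 事件数据
--     :return: 去除重复后的事件日期列表, 事件数据
--     """
--     date_event_dict = {}
--     for e, d in events:
--         date_event_dict.setdefault(d, []).append(e)
--
--     for d, es in date_event_dict.items():
--         if len(es) > 0:
--             if event_priority in es:
--                 date_event_dict[d] = [event_priority]
--             else:
--                 date_event_dict[d] = es[:1]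
--
--     events = list(date_event_dict.items())
--     dates_events = [e[0] for e in events]
--     events = [e[1][0] for e in events]
--     return dates_events, events
-- ===== SOURCE B (Python) =====
-- def remove_dupli_dates_events(events, event_priority):
--     """Single pass: keep first-seen event per date, overridden by event_priority if it occurs."""
--     chosen = {}
--     for e, d in events:
--         if d not in chosen:
--             chosen[d] = e
--         if e == event_priority:
--             chosen[d] = event_priority
--     return list(chosen.keys()), list(chosen.values())
-- ===== Notes on version B (the rewrite author's own statement) =====
-- stated objective: simpler
-- what changed: Replaces the group-into-lists pass plus rewrite pass plus two projection comprehensions with one pass keeping a single chosen event per date (first seen, overridden by the priority event).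
import Mathlib
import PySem

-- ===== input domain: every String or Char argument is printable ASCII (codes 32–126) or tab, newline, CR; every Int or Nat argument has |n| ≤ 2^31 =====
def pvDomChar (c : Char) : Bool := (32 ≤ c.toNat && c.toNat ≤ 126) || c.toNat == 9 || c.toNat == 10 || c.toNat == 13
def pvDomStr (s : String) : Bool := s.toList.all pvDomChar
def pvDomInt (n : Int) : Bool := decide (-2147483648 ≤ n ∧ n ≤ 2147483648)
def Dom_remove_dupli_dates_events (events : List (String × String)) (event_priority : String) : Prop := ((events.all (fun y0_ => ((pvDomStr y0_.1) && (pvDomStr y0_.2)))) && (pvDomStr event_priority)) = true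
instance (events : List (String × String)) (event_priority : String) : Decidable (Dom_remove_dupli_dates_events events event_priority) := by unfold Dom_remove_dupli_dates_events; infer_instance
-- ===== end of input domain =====

-- B replaces A's group-into-lists pass + rewrite pass + two projections with one pass keeping a single chosen event per date (simpler).

-- ===== PORT A =====
-- first loop: date_event_dict.setdefault(d, []).append(e)  ==  modify d [] (· ++ [e])
def pvStepA1 (dd : PySem.Dict String (List String)) (p : String × String) : PySem.Dict String (List String) :=
  dd.modify p.2 [] (fun es => es ++ [p.1])

-- second loop body: if len(es) > 0: d[d'] = [pri] if pri in es else es[:1]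
def pvStepA2 (pri : String) (dd : PySem.Dict String (List String)) (p : String × List String) : PySem.Dict String (List String) :=
  if 0 < p.2.length then
    dd.insert p.1 (if p.2.contains pri then [pri] else PySem.List.slice p.2 none (some 1))
  else dd

def remove_dupli_dates_events (events : List (String × String)) (event_priority : String) : List String × List String :=
  let d0 : PySem.Dict String (List String) := events.foldl pvStepA1 PySem.Dict.empty
  let d1 : PySem.Dict String (List String) := d0.items.foldl (pvStepA2 event_priority) d0
  let evs := d1.items
  (evs.map (fun e => e.1), evs.map (fun e => e.2.headD ""))
  -- e[1][0]: every stored list is nonempty by construction, so headD's default is never used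

-- ===== PORT B =====
def pvStepB (pri : String) (c : PySem.Dict String String) (p : String × String) : PySem.Dict String String :=
  let c' := if c.contains p.2 then c else c.insert p.2 p.1
  if p.1 == pri then c'.insert p.2 pri else c'

def remove_dupli_dates_events_alt (events : List (String × String)) (event_priority : String) : List String × List String :=
  let chosen : PySem.Dict String String := events.foldl (pvStepB event_priority) PySem.Dict.empty
  (chosen.keys, chosen.values)

-- ===== PRECONDITION & SPEC =====
def Spec_remove_dupli_dates_events (events : List (String × String)) (event_priority : String) (out : List String × List String) : Prop := out = remove_dupli_dates_events_alt events event_priority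
instance (events : List (String × String)) (event_priority : String) (out : List String × List String) : Decidable (Spec_remove_dupli_dates_events events event_priority out) := by unfold Spec_remove_dupli_dates_events; infer_instance

-- ===== CLAIM (what is proved, stated in full; the proofs are below) =====
def Claim_equal_remove_dupli_dates_events : Prop := ∀ (events : List (String × String)) (event_priority : String), Dom_remove_dupli_dates_events events event_priority → Spec_remove_dupli_dates_events events event_priority (remove_dupli_dates_events events event_priority)

-- ===== LEMMAS AND PROOFS =====

-- in a list of pairs with distinct first components, find? by first component returns the member
theorem pv_find?_fst_eq_of_mem {ν : Type} (l : List (String × ν)) (k : String) (v : ν)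
    (hn : (l.map (·.1)).Nodup) (h : (k, v) ∈ l) :
    l.find? (fun p => p.1 == k) = some (k, v) := by
  induction l with
  | nil => cases h
  | cons a t ih =>
    simp only [List.map_cons, List.nodup_cons] at hn
    rcases List.mem_cons.mp h with h | h
    · subst h; simp [List.find?]
    · have hk : k ∈ t.map (·.1) := List.mem_map.mpr ⟨(k, v), h, rfl⟩
      have hne : (a.1 == k) = false := by
        simp only [beq_eq_false_iff_ne]; rintro rfl; exact hn.1 hk
      simp [hne, ih hn.2 h]

-- A's second loop: value at k after the rewrite pass
theorem pv_foldA2_getD (pri : String) (l : List (String × List String)) (k : String)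
    (hn : (l.map (·.1)).Nodup) :
    ∀ d : PySem.Dict String (List String),
    (l.foldl (pvStepA2 pri) d).getD k [] =
      (match l.find? (fun p => p.1 == k) with
       | some p => if 0 < p.2.length then
            (if p.2.contains pri then [pri] else PySem.List.slice p.2 none (some 1))
          else d.getD k []
       | none => d.getD k []) := by
  induction l with
  | nil => intro d; simp
  | cons a t ih =>
    intro d
    simp only [List.map_cons, List.nodup_cons] at hn
    by_cases hk : a.1 = k
    · subst hk
      have hfind : t.find? (fun p => p.1 == a.1) = none := by
        rw [List.find?_eq_none]
        intro x hx hbe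
        exact hn.1 (List.mem_map.mpr ⟨x, hx, by simpa using hbe⟩)
      have hge : (pvStepA2 pri d a).getD a.1 [] =
          (if 0 < a.2.length then
            (if a.2.contains pri then [pri] else PySem.List.slice a.2 none (some 1))
          else d.getD a.1 []) := by
        unfold pvStepA2; split
        · simp [PySem.Dict.getD_insert_self]
        · rfl
      simp only [List.foldl_cons, List.find?_cons, beq_self_eq_true]
      rw [ih hn.2, hfind, hge]
    · have hbe : (a.1 == k) = false := by simp [hk]
      have hge : (pvStepA2 pri d a).getD k [] = d.getD k [] := by
        unfold pvStepA2; split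
        · exact PySem.Dict.getD_insert_of_ne _ _ _ (fun h => hk (Eq.symm h))
        · rfl
      simp only [List.foldl_cons, List.find?_cons, hbe]
      rw [ih hn.2, hge]

-- A's second loop only rewrites existing keys, so keys are unchanged
theorem pv_foldA2_keys (pri : String) (l : List (String × List String)) :
    ∀ d : PySem.Dict String (List String), (∀ p ∈ l, p.1 ∈ d.keys) →
    (l.foldl (pvStepA2 pri) d).keys = d.keys := by
  induction l with
  | nil => intro d _; rfl
  | cons a t ih =>
    intro d h
    have hc : d.contains a.1 = true :=
      (PySem.Dict.contains_iff_mem_keys _ _).mpr (h a (List.mem_cons_self))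
    have hkeys : (pvStepA2 pri d a).keys = d.keys := by
      unfold pvStepA2; split
      · exact PySem.Dict.keys_insert_of_contains _ _ hc
      · rfl
    simp only [List.foldl_cons]
    rw [ih _ (fun p hp => hkeys ▸ h p (List.mem_cons_of_mem _ hp)), hkeys]

-- A's first loop: grouped keys are the dates in first-occurrence order
theorem pv_d0_keys (events : List (String × String)) :
    (events.foldl pvStepA1 (PySem.Dict.empty : PySem.Dict String (List String))).keys
      = PySem.Set.ofList (events.map (fun p => p.2)) := by
  have h := PySem.Dict.keys_foldl_modify_key (l := events) (key := fun p : String × String => p.2)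
    (d0 := ([] : List String)) (f := fun _ p => fun es => es ++ [p.1])
    (d := (PySem.Dict.empty : PySem.Dict String (List String)))
  simpa [pvStepA1, PySem.Dict.keys_empty, PySem.Set.update_nil_left] using h

-- A's first loop: the list grouped at k is the events dated k, in order
theorem pv_d0_getD (events : List (String × String)) (k : String) :
    (events.foldl pvStepA1 (PySem.Dict.empty : PySem.Dict String (List String))).getD k []
      = (events.filter (fun p => p.2 == k)).map (fun p => p.1) := by
  have h := PySem.Dict.getD_foldl_modify_append
    (l := events.map (fun p => (p.2, p.1))) (d := (PySem.Dict.empty : PySem.Dict String (List String))) (c := k)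
  rw [List.foldl_map] at h
  simpa [pvStepA1, List.filter_map, List.map_map, Function.comp] using h

-- B's loop: keys are the dates in first-occurrence order
theorem pvStepB_keys (pri : String) (c : PySem.Dict String String) (p : String × String) :
    (pvStepB pri c p).keys = PySem.Set.add c.keys p.2 := by
  unfold pvStepB
  by_cases h : c.contains p.2 = true
  · have hm : p.2 ∈ c.keys := (PySem.Dict.contains_iff_mem_keys _ _).mp h
    rw [PySem.Set.add_of_mem hm]
    rw [if_pos h]
    split
    · exact PySem.Dict.keys_insert_of_contains _ _ h
    · rfl
  · have hm : p.2 ∉ c.keys := fun hmem => h ((PySem.Dict.contains_iff_mem_keys _ _).mpr hmem)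
    rw [PySem.Set.add_of_not_mem hm]
    rw [if_neg h]
    have h1 : (c.insert p.2 p.1).keys = c.keys ++ [p.2] :=
      PySem.Dict.keys_insert_of_not_contains _ _ (by simpa using h)
    split
    · rw [PySem.Dict.keys_insert_of_contains _ _ (PySem.Dict.contains_insert_self _ _ _), h1]
    · exact h1

theorem pvFoldB_keys (pri : String) (l : List (String × String)) :
    ∀ d, (l.foldl (pvStepB pri) d).keys = PySem.Set.update d.keys (l.map (fun p => p.2)) := by
  induction l with
  | nil => intro d; rfl
  | cons a t ih =>
    intro d
    simp only [List.foldl_cons, List.map_cons, PySem.Set.update_cons]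
    rw [ih, pvStepB_keys]

-- B's loop: the chosen event at k is the priority if it occurs dated k, else the first event dated k
theorem pvFoldB_get? (pri : String) (l : List (String × String)) (k : String) :
    ∀ d, (l.foldl (pvStepB pri) d).get? k =
      (if ((l.filter (fun p => p.2 == k)).map (fun p => p.1)).contains pri then some pri
       else ((d.get? k).or ((l.filter (fun p => p.2 == k)).map (fun p => p.1)).head?)) := by
  induction l with
  | nil => intro d; simp
  | cons a t ih =>
    intro d
    simp only [List.foldl_cons]
    rw [ih]
    by_cases hk : a.2 = k
    · subst hk
      simp only [List.filter_cons, beq_self_eq_true, if_true, List.map_cons]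
      by_cases hp : a.1 = pri
      · subst hp
        have hget : (pvStepB a.1 d a).get? a.2 = some a.1 := by
          unfold pvStepB
          simp [PySem.Dict.get?_insert_self]
        rw [hget]
        simp
      · have hbe : (a.1 == pri) = false := by simp [hp]
        have hget : (pvStepB pri d a).get? a.2 = (d.get? a.2).or (some a.1) := by
          unfold pvStepB
          rw [if_neg (by simp [hp] : ¬ (a.1 == pri) = true)]
          by_cases hc : d.contains a.2 = true
          · rw [if_pos hc]
            cases hg : d.get? a.2 with
            | none => exact absurd hg (by simpa [PySem.Dict.get?_eq_none_iff_contains] using hc)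
            | some v => simp
          · rw [if_neg hc]
            have hg : d.get? a.2 = none := by
              rw [PySem.Dict.get?_eq_none_iff_contains]; simpa using hc
            simp [hg, PySem.Dict.get?_insert_self]
        rw [hget]
        have hpa : (pri == a.1) = false := by
          simp only [beq_eq_false_iff_ne]; exact fun hh => hp (Eq.symm hh)
        simp only [List.contains_cons, hpa, Bool.false_or]
        by_cases hmem : ((t.filter (fun p => p.2 == a.2)).map (fun p => p.1)).contains pri = true
        · rw [if_pos hmem, if_pos hmem]
        · rw [if_neg hmem, if_neg hmem]
          cases hd : d.get? a.2 <;> simp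
    · have hbe : (a.2 == k) = false := by simp [hk]
      have hget : (pvStepB pri d a).get? k = d.get? k := by
        unfold pvStepB
        have hne : k ≠ a.2 := fun h => hk h.symm
        split <;> split <;> simp [PySem.Dict.get?_insert_of_ne _ _ hne]
      simp only [List.filter_cons, hbe, Bool.false_eq_true, if_false]
      rw [hget]

-- pointwise: at every date k the two sides choose the same event
theorem pv_value_eq (events : List (String × String)) (pri k : String)
    (hkmem : k ∈ (events.foldl pvStepA1 (PySem.Dict.empty : PySem.Dict String (List String))).keys) :
    (((events.foldl pvStepA1 (PySem.Dict.empty : PySem.Dict String (List String))).items.foldl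
        (pvStepA2 pri) (events.foldl pvStepA1 PySem.Dict.empty)).getD k []).headD ""
      = (events.foldl (pvStepB pri) (PySem.Dict.empty : PySem.Dict String String)).getD k "" := by
  have hkeys0 := pv_d0_keys events
  have hnd0 : (events.foldl pvStepA1 (PySem.Dict.empty : PySem.Dict String (List String))).keys.Nodup :=
    hkeys0 ▸ PySem.Set.nodup_ofList _
  set d0 := events.foldl pvStepA1 (PySem.Dict.empty : PySem.Dict String (List String)) with hd0
  set es := (events.filter (fun p => p.2 == k)).map (fun p => p.1) with hes
  obtain ⟨p, hp, hpk⟩ : ∃ p ∈ events, p.2 = k := by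
    have := (PySem.Set.mem_ofList _ _).mp (hkeys0 ▸ hkmem)
    obtain ⟨p, hp, rfl⟩ := List.mem_map.mp this
    exact ⟨p, hp, rfl⟩
  have hesne : es ≠ [] := by
    simp only [hes, ne_eq, List.map_eq_nil_iff, List.filter_eq_nil_iff]
    push Not
    exact ⟨p, hp, by simp [hpk]⟩
  have hgd0 : d0.getD k [] = es := pv_d0_getD events k
  have hget0 : d0.get? k = some es := by
    cases hg : d0.get? k with
    | none =>
      exact absurd ((PySem.Dict.get?_eq_none_iff_not_mem_keys _ _).mp hg) (by simpa using hkmem)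
    | some v =>
      have hv : es = v := by rw [← hgd0, PySem.Dict.getD_eq_get?_getD, hg]; rfl
      rw [hv]
  have hmemit : (k, es) ∈ d0.items := PySem.Dict.mem_items_of_get?_eq_some _ hget0
  have hndfst : (d0.items.map (fun p => p.1)).Nodup := hnd0
  have hfind : d0.items.find? (fun p => p.1 == k) = some (k, es) :=
    pv_find?_fst_eq_of_mem _ _ _ hndfst hmemit
  have hlen : 0 < es.length := List.length_pos_of_ne_nil hesne
  -- A's value at k
  have hA : (d0.items.foldl (pvStepA2 pri) d0).getD k [] =
      (if es.contains pri then [pri] else PySem.List.slice es none (some 1)) := by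
    rw [pv_foldA2_getD pri d0.items k hndfst d0, hfind]
    simp [hlen]
  -- B's value at k
  have hB : (events.foldl (pvStepB pri) (PySem.Dict.empty : PySem.Dict String String)).getD k "" =
      (if es.contains pri then some pri else es.head?).getD "" := by
    rw [PySem.Dict.getD_eq_get?_getD, pvFoldB_get? pri events k]
    simp [← hes]
  rw [hA, hB]
  by_cases hm : pri ∈ es
  · simp [hm]
  · rw [if_neg (by simpa using hm), if_neg (by simpa using hm)]
    rw [PySem.List.slice_to es (by norm_num : (0:Int) ≤ 1)]
    cases es with
    | nil => simp
    | cons a t => simp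

-- ===== VERDICT (by name: the statement is the Claim_ definition above) =====
theorem remove_dupli_dates_events_spec : Claim_equal_remove_dupli_dates_events := by
  intro events pri _
  show remove_dupli_dates_events events pri = remove_dupli_dates_events_alt events pri
  unfold remove_dupli_dates_events remove_dupli_dates_events_alt
  have hkeys0 := pv_d0_keys events
  set d0 := events.foldl pvStepA1 (PySem.Dict.empty : PySem.Dict String (List String)) with hd0
  set d1 := d0.items.foldl (pvStepA2 pri) d0 with hd1
  set ch := events.foldl (pvStepB pri) (PySem.Dict.empty : PySem.Dict String String) with hch
  have hnd0 : d0.keys.Nodup := hkeys0 ▸ PySem.Set.nodup_ofList _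
  have hkeys1 : d1.keys = d0.keys :=
    pv_foldA2_keys pri d0.items d0 (fun p hp => PySem.Dict.mem_keys_of_mem_items _ hp)
  have hnd1 : d1.keys.Nodup := hkeys1 ▸ hnd0
  have hkeysB : ch.keys = d0.keys := by
    rw [hch, pvFoldB_keys, hkeys0]
    simp [PySem.Dict.keys_empty, PySem.Set.update_nil_left]
  have hndB : ch.keys.Nodup := hkeysB ▸ hnd0
  have hitems1 := PySem.Dict.items_eq_map_keys d1 hnd1 []
  have hvalsB := PySem.Dict.values_eq_map_keys ch hndB ""
  refine Prod.ext ?_ ?_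
  · show d1.items.map (fun e => e.1) = ch.keys
    have : d1.items.map (fun e => e.1) = d1.keys := rfl
    rw [this, hkeys1, hkeysB]
  · show d1.items.map (fun e => e.2.headD "") = ch.values
    rw [hvalsB, hitems1, hkeys1, hkeysB, List.map_map]
    refine List.map_congr_left ?_
    intro k hk
    exact pv_value_eq events pri k hk
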